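-- pv_equiv track=rewrite | github.com/ES-EDU-SIEGMA/User-Interface | progressWindow.py | getEstimatedWeight
-- ===== SOURCE A (Python) =====
-- def getEstimatedWeight(__timeList):
--     res = 0
--     for i in range(len(__timeList)):
--         hoppersize = 30
--         if __timeList[i][0] > 8:
--             hoppersize = 40
--         for y in range(len(__timeList[i]) - 1):
--             res += hoppersize
--     return res
-- ===== SOURCE B (Python) =====
-- def getEstimatedWeight(__timeList):
--     # Staged aggregate computation: each sublist contributes hoppersize*(len-1),
--     # i.e. a base of 30*(len-1) plus a 10*(len-1) surcharge when its first entry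
--     # exceeds 8.  So: total = 30*(sum of lengths - count) + 10*(same over the
--     # "heavy" sublists only).  No per-element work: len() is O(1).
--     total = sum(len(t) for t in __timeList)
--     n = len(__timeList)
--     heavy = [t for t in __timeList if t[0] > 8]
--     heavy_total = sum(len(t) for t in heavy)
--     return 30 * (total - n) + 10 * (heavy_total - len(heavy))
-- ===== Notes on version B (the rewrite author's own statement) =====
-- stated objective: faster
-- what changed: replaces the per-element accumulation by staged aggregates: total length, sublist count, and the same pair restricted to sublists with first entry > 8, combined as 30*(total-n) + 10*(heavy_total-heavy_count)
-- outside the precondition, e.g. on getEstimatedWeight([[]]): A raises IndexError, B raises IndexError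
import Mathlib
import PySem

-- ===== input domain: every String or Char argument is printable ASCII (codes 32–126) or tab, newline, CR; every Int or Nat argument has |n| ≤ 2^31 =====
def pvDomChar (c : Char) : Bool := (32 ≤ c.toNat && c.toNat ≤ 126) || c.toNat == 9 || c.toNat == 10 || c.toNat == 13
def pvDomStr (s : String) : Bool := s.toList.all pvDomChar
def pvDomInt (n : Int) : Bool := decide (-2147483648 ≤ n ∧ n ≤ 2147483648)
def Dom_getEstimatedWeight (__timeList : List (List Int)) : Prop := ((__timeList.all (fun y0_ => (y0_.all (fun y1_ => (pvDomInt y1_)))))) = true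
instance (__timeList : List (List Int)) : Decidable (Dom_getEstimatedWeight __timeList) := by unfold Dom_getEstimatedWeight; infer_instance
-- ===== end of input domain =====

-- B replaces A's per-element accumulation by staged aggregates (total length, sublist count, same over heavy sublists), combined by one arithmetic formula (faster).


-- ===== PORT A =====
def getEstimatedWeight (__timeList : List (List Int)) : Int :=
  (PySem.List.pyRange 0 (__timeList.length : Int) 1).foldl
    (fun res i =>
      let row := PySem.List.pyGetD __timeList i []
      let hoppersize : Int := if PySem.List.pyGetD row 0 0 > 8 then 40 else 30
      (PySem.List.pyRange 0 ((row.length : Int) - 1) 1).foldl (fun r _ => r + hoppersize) res)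
    0

-- ===== PORT B =====
def getEstimatedWeight_alt (__timeList : List (List Int)) : Int :=
  let total : Int := (__timeList.map (fun t => (t.length : Int))).sum
  let n : Int := (__timeList.length : Int)
  let heavy := __timeList.filter (fun t => PySem.List.pyGetD t 0 0 > 8)
  let heavy_total : Int := (heavy.map (fun t => (t.length : Int))).sum
  30 * (total - n) + 10 * (heavy_total - (heavy.length : Int))

-- ===== PRECONDITION & SPEC =====
-- A (and B) raise IndexError on t[0] for an empty sublist; Pre_ excludes inputs containing one.
def Pre_getEstimatedWeight (__timeList : List (List Int)) : Prop :=
  ∀ t ∈ __timeList, t ≠ []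
instance (__timeList : List (List Int)) : Decidable (Pre_getEstimatedWeight __timeList) := by unfold Pre_getEstimatedWeight; infer_instance

def pvWitness_getEstimatedWeight : List (List Int) := [[9, 1, 2], [3], [0, 5]]

def Spec_getEstimatedWeight (__timeList : List (List Int)) (out : Int) : Prop := out = getEstimatedWeight_alt __timeList
instance (__timeList : List (List Int)) (out : Int) : Decidable (Spec_getEstimatedWeight __timeList out) := by unfold Spec_getEstimatedWeight; infer_instance

-- ===== CLAIM (what is proved, stated in full; the proofs are below) =====
def Claim_equal_getEstimatedWeight : Prop := ∀ (__timeList : List (List Int)), Dom_getEstimatedWeight __timeList → Pre_getEstimatedWeight __timeList → Spec_getEstimatedWeight __timeList (getEstimatedWeight __timeList)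

-- ===== LEMMAS AND PROOFS =====

-- the inner 'res += hoppersize' loop adds hoppersize once per iteration
lemma foldl_const_add (l : List Int) (h res : Int) :
    l.foldl (fun r _ => r + h) res = res + h * l.length := by
  induction l generalizing res with
  | nil => simp
  | cons x t ih => simp [List.foldl, ih]; ring

-- A's outer loop accumulates hoppersize*(len-1) over the sublists
lemma getEstimatedWeight_foldl (tl : List (List Int)) (res : Int)
    (hpre : ∀ t ∈ tl, t ≠ []) :
    tl.foldl (fun res row =>
      (PySem.List.pyRange 0 ((row.length : Int) - 1) 1).foldl
        (fun r _ => r + (if PySem.List.pyGetD row 0 0 > 8 then (40 : Int) else 30)) res) res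
    = res + (tl.map (fun t =>
        (if PySem.List.pyGetD t 0 0 > 8 then (40 : Int) else 30) * ((t.length : Int) - 1))).sum := by
  induction tl generalizing res with
  | nil => simp
  | cons row t ih =>
    have hrow : row ≠ [] := hpre row (by simp)
    have hlen : 1 ≤ (row.length : Int) := by
      have := List.length_pos_of_ne_nil hrow; omega
    simp only [List.foldl, List.map, List.sum_cons]
    rw [ih _ (fun x hx => hpre x (by simp [hx])), foldl_const_add,
      PySem.List.length_pyRange_one]
    have : (((row.length : Int) - 1 - 0).toNat : Int) = (row.length : Int) - 1 := by omega
    rw [this]; ring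

-- the per-sublist sum equals B's staged-aggregate formula (holds unconditionally)
lemma sum_split (tl : List (List Int)) :
    (tl.map (fun t =>
        (if PySem.List.pyGetD t 0 0 > 8 then (40 : Int) else 30) * ((t.length : Int) - 1))).sum
    = 30 * ((tl.map (fun t => (t.length : Int))).sum - (tl.length : Int))
      + 10 * (((tl.filter (fun t => PySem.List.pyGetD t 0 0 > 8)).map
                 (fun t => (t.length : Int))).sum
              - ((tl.filter (fun t => PySem.List.pyGetD t 0 0 > 8)).length : Int)) := by
  induction tl with
  | nil => simp
  | cons row t ih =>
    simp only [List.map_cons, List.sum_cons, List.filter_cons, List.length_cons]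
    rw [ih]
    by_cases h : PySem.List.pyGetD row 0 0 > 8 <;>
      simp only [h, if_true, if_false, decide_true, decide_false,
        List.map_cons, List.sum_cons, List.length_cons] <;> push_cast <;> ring

theorem getEstimatedWeight_spec_aux (tl : List (List Int))
    (hpre : Pre_getEstimatedWeight tl) :
    getEstimatedWeight tl = getEstimatedWeight_alt tl := by
  unfold getEstimatedWeight getEstimatedWeight_alt
  rw [PySem.List.foldl_pyRange_zero_pyGetD' tl ([] : List Int)
    (fun res row =>
      (PySem.List.pyRange 0 ((row.length : Int) - 1) 1).foldl
        (fun r _ => r + (if PySem.List.pyGetD row 0 0 > 8 then (40 : Int) else 30)) res) 0]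
  rw [getEstimatedWeight_foldl tl 0 hpre, sum_split tl]
  simp

-- ===== VERDICT (by name: the statement is the Claim_ definition above) =====
theorem getEstimatedWeight_spec : Claim_equal_getEstimatedWeight := by
  intro tl _ hpre
  exact getEstimatedWeight_spec_aux tl hpre
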